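-- pv_equiv track=rewrite | github.com/eranyw/github | hw3.py | split_male_female
-- ===== SOURCE A (Python) =====
-- def split_male_female(data_set):
--     male_dict = {}
--     female_dict = {}
--     for key, value in data_set.items():
--         if data_set[key]["sex"] == "male":
--             male_dict[key]=value
--     for key,value in data_set.items() :
--         if data_set[key]["sex"] == "female":
--             female_dict[key] = value
--     return male_dict,female_dict
-- ===== SOURCE B (Python) =====
-- def split_male_female(data_set):
--     male_dict = {}
--     female_dict = {}
--     for key, value in data_set.items():
--         sex = value["sex"]
--         if sex == "male":
--             male_dict[key] = value
--         elif sex == "female":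
--             female_dict[key] = value
--     return male_dict, female_dict
-- ===== Notes on version B (the rewrite author's own statement) =====
-- stated objective: simpler
-- what changed: Replaces A's two full passes (each re-looking up data_set[key] for the entry it already holds) with a single pass over items() that reads value['sex'] once and routes the entry with an if/elif.
import Mathlib
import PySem

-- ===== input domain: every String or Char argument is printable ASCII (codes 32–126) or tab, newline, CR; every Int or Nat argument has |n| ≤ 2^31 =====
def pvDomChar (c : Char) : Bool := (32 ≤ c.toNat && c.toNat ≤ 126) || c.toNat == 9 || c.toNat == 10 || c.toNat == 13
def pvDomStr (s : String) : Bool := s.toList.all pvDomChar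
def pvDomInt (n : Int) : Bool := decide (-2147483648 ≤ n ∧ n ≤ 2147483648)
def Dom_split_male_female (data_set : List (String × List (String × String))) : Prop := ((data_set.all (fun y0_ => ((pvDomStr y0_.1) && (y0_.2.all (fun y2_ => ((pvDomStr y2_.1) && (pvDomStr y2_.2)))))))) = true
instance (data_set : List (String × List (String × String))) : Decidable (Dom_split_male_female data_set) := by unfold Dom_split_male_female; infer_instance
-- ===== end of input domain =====

-- B folds data_set once, reading each record's "sex" directly and routing it with if/elif,
-- instead of A's two full passes each re-looking up data_set[key]; objective: simpler.


-- ===== PORT A =====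
-- data_set[key]["sex"] as an Option chain: none exactly where Python raises (excluded by Pre_).
def sexLookup (data_set : List (String × List (String × String))) (key : String) : Option String :=
  ((PySem.Dict.mk data_set).get? key).bind (fun rec => (PySem.Dict.mk rec).get? "sex")

def split_male_female (data_set : List (String × List (String × String))) : (List (String × List (String × String))) × (List (String × List (String × String))) :=
  let male_dict : PySem.Dict String (List (String × String)) :=
    data_set.foldl (fun d kv =>
      if sexLookup data_set kv.1 = some "male" then d.insert kv.1 kv.2 else d) PySem.Dict.empty
  let female_dict : PySem.Dict String (List (String × String)) :=
    data_set.foldl (fun d kv =>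
      if sexLookup data_set kv.1 = some "female" then d.insert kv.1 kv.2 else d) PySem.Dict.empty
  (male_dict.items, female_dict.items)

-- ===== PORT B =====
def split_male_female_alt (data_set : List (String × List (String × String))) : (List (String × List (String × String))) × (List (String × List (String × String))) :=
  let p : PySem.Dict String (List (String × String)) × PySem.Dict String (List (String × String)) :=
    data_set.foldl (fun acc kv =>
      let sex := (PySem.Dict.mk kv.2).get? "sex"      -- value["sex"]
      if sex = some "male" then (acc.1.insert kv.1 kv.2, acc.2)
      else if sex = some "female" then (acc.1, acc.2.insert kv.1 kv.2)
      else acc) (PySem.Dict.empty, PySem.Dict.empty)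
  (p.1.items, p.2.items)

-- ===== PRECONDITION & SPEC =====
-- Pre_ excludes (a) records without a "sex" key, on which the Python A raises KeyError, and
-- (b) association lists with duplicate outer keys, which do not represent any Python dict input
-- (a dict has unique keys), so no claim about A is available there.
def Pre_split_male_female (data_set : List (String × List (String × String))) : Prop :=
  (data_set.map Prod.fst).Nodup ∧ ∀ p ∈ data_set, "sex" ∈ p.2.map Prod.fst
instance (data_set : List (String × List (String × String))) : Decidable (Pre_split_male_female data_set) := by unfold Pre_split_male_female; infer_instance

def pvWitness_split_male_female : (List (String × List (String × String))) :=
  [("a", [("sex", "male")]), ("b", [("sex", "female")]), ("c", [("sex", "other")])]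

def Spec_split_male_female (data_set : List (String × List (String × String))) (out : (List (String × List (String × String))) × (List (String × List (String × String)))) : Prop := out = split_male_female_alt data_set
instance (data_set : List (String × List (String × String))) (out : (List (String × List (String × String))) × (List (String × List (String × String)))) : Decidable (Spec_split_male_female data_set out) := by unfold Spec_split_male_female; infer_instance

-- ===== CLAIM (what is proved, stated in full; the proofs are below) =====
def Claim_equal_split_male_female : Prop := ∀ (data_set : List (String × List (String × String))), Dom_split_male_female data_set → Pre_split_male_female data_set → Spec_split_male_female data_set (split_male_female data_set)

-- ===== LEMMAS AND PROOFS =====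

-- the record's own "sex" value, what B reads
def sexOf (kv : String × List (String × String)) : Option String :=
  (PySem.Dict.mk kv.2).get? "sex"

-- With distinct outer keys, looking an entry's key up in the whole dict gives back its own record.
theorem find?_self_of_nodup (kv : String × List (String × String)) :
    ∀ ds : List (String × List (String × String)),
    (ds.map Prod.fst).Nodup → kv ∈ ds → (PySem.Dict.mk ds).get? kv.1 = some kv.2 := by
  intro ds
  induction ds with
  | nil => intro _ hkv; cases hkv
  | cons hd tl ih =>
    intro h hkv
    rw [PySem.Dict.get?_mk_cons]
    simp only [List.map_cons, List.nodup_cons] at h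
    rcases List.mem_cons.mp hkv with hkv' | hkv'
    · subst hkv'; simp
    · have hne : (hd.1 == kv.1) = false := by
        simp only [beq_eq_false_iff_ne, ne_eq]
        intro he
        exact h.1 (he ▸ List.mem_map_of_mem hkv')
      rw [hne]
      simp only [Bool.false_eq_true, if_false]
      exact ih h.2 hkv'

-- A's conditions, rewritten to read each entry's own record (valid under Nodup outer keys).
theorem sexLookup_eq_sexOf (ds : List (String × List (String × String)))
    (h : (ds.map Prod.fst).Nodup) (kv : String × List (String × String)) (hkv : kv ∈ ds) :
    sexLookup ds kv.1 = sexOf kv := by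
  unfold sexLookup sexOf
  rw [find?_self_of_nodup kv ds h hkv]
  rfl

-- B's single fold over a pair of dicts is the pair of A's two folds (the branches are disjoint).
theorem pair_fold_split (ds : List (String × List (String × String)))
    (d1 d2 : PySem.Dict String (List (String × String))) :
    ds.foldl (fun acc kv =>
      let sex := (PySem.Dict.mk kv.2).get? "sex"
      if sex = some "male" then (acc.1.insert kv.1 kv.2, acc.2)
      else if sex = some "female" then (acc.1, acc.2.insert kv.1 kv.2)
      else acc) (d1, d2) =
    (ds.foldl (fun d kv => if sexOf kv = some "male" then d.insert kv.1 kv.2 else d) d1,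
     ds.foldl (fun d kv => if sexOf kv = some "female" then d.insert kv.1 kv.2 else d) d2) := by
  induction ds generalizing d1 d2 with
  | nil => rfl
  | cons hd tl ih =>
    simp only [List.foldl_cons]
    by_cases h1 : sexOf hd = some "male" <;> by_cases h2 : sexOf hd = some "female"
    · exact absurd h2 (by rw [h1]; decide)
    · rw [show ((PySem.Dict.mk hd.2).get? "sex") = sexOf hd from rfl]
      simp only [h1, if_true]
      exact ih _ _
    · rw [show ((PySem.Dict.mk hd.2).get? "sex") = sexOf hd from rfl]
      simp only [h2, if_true]
      exact ih _ _
    · rw [show ((PySem.Dict.mk hd.2).get? "sex") = sexOf hd from rfl]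
      simp only [h1, h2, if_false]
      exact ih _ _

-- ===== VERDICT (by name: the statement is the Claim_ definition above) =====
theorem split_male_female_spec : Claim_equal_split_male_female := by
  intro ds _ hpre
  unfold Spec_split_male_female
  simp only [split_male_female, split_male_female_alt]
  have hm : List.foldl (fun d kv => if sexLookup ds kv.1 = some "male" then d.insert kv.1 kv.2 else d)
      (PySem.Dict.empty : PySem.Dict String (List (String × String))) ds =
      List.foldl (fun d kv => if sexOf kv = some "male" then d.insert kv.1 kv.2 else d) PySem.Dict.empty ds :=
    PySem.List.foldl_congr_mem ds _ _ _ (fun acc kv hkv => by rw [sexLookup_eq_sexOf ds hpre.1 kv hkv])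
  have hf : List.foldl (fun d kv => if sexLookup ds kv.1 = some "female" then d.insert kv.1 kv.2 else d)
      (PySem.Dict.empty : PySem.Dict String (List (String × String))) ds =
      List.foldl (fun d kv => if sexOf kv = some "female" then d.insert kv.1 kv.2 else d) PySem.Dict.empty ds :=
    PySem.List.foldl_congr_mem ds _ _ _ (fun acc kv hkv => by rw [sexLookup_eq_sexOf ds hpre.1 kv hkv])
  rw [hm, hf, pair_fold_split]
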